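-- pv_equiv track=rewrite | github.com/phylocko/py-lg | models.py | _parse__show_route_peer
-- ===== SOURCE A (Python) =====
-- def _parse__show_route_peer(bird_dump) -> list:
--     # splits dump into text blocks, each of them represent a single route
--     blocks = []
--     dump = ''
--
--     for line in bird_dump.splitlines():
--         if 'unicast' in line:
--             if dump:
--                 blocks.append(dump)
--                 dump = ''
--             dump += line + '\n'
--         else:
--             if dump:
--                 dump += line + '\n'
--     if dump:
--         blocks.append(dump)
--     return blocks
-- ===== SOURCE B (Python) =====
-- def _parse__show_route_peer(bird_dump) -> list:
--     # scan for delimiter indices, then slice-and-join each block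
--     lines = bird_dump.splitlines()
--     n = len(lines)
--
--     def next_delim(k):
--         while k < n and 'unicast' not in lines[k]:
--             k += 1
--         return k
--
--     blocks = []
--     i = next_delim(0)
--     while i < n:
--         j = next_delim(i + 1)
--         blocks.append(''.join(line + '\n' for line in lines[i:j]))
--         i = j
--     return blocks
-- ===== Notes on version B (the rewrite author's own statement) =====
-- stated objective: alternative
-- what changed: Replaces the single-pass string-accumulator fold with an index scan for delimiter lines followed by slice-and-join of each block (two-phase: locate next 'unicast' line, then join lines[i:j]).
import Mathlib
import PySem

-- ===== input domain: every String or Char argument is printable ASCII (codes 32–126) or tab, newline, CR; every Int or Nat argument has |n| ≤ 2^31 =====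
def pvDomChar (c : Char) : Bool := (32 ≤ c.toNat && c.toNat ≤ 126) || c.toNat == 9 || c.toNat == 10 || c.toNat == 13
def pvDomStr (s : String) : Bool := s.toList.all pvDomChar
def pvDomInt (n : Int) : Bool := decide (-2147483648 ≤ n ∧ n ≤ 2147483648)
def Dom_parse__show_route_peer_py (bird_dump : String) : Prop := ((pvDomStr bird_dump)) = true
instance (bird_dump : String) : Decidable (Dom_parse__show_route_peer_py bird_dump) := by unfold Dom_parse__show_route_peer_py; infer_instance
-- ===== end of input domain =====

-- B replaces A's single-pass string-accumulator fold by a delimiter-index scan plus slice-and-join per block (alternative decomposition, same cost).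

-- ===== PORT A =====
-- one iteration of A's for-loop; the state is (blocks, dump)
def pvStepA (st : List String × String) (line : String) : List String × String :=
  if PySem.Str.isIn "unicast" line then
    -- if dump: blocks.append(dump); dump = ''
    let st1 := if st.2 ≠ "" then (st.1 ++ [st.2], "") else st
    -- dump += line + '\n'
    (st1.1, st1.2 ++ (line ++ "\n"))
  else
    -- if dump: dump += line + '\n'
    if st.2 ≠ "" then (st.1, st.2 ++ (line ++ "\n")) else st

def parse__show_route_peer_py (bird_dump : String) : List String :=
  let r := (PySem.Str.splitlines bird_dump).foldl pvStepA ([], "")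
  if r.2 ≠ "" then r.1 ++ [r.2] else r.1

-- ===== PORT B =====
-- next_delim: first index ≥ k whose line contains 'unicast', else len(lines)
def pvNextDelim (lines : List String) (k : Nat) : Nat :=
  if h : k < lines.length then
    if PySem.Str.isIn "unicast" (lines.getD k "") then k else pvNextDelim lines (k + 1)
  else k
termination_by lines.length - k

-- termination fact for the block loop below (cited by its decreasing_by)
theorem pvNextDelim_ge (lines : List String) (k : Nat) : k ≤ pvNextDelim lines k := by
  rw [pvNextDelim]
  split
  · split
    · exact Nat.le_refl k
    · exact Nat.le_trans (Nat.le_succ k) (pvNextDelim_ge lines (k + 1))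
  · exact Nat.le_refl k
termination_by lines.length - k

-- the while-loop over block start indices: slice lines[i:j] and join line + '\n' over it
def pvAltLoop (lines : List String) (i : Nat) : List String :=
  if h : i < lines.length then
    let j := pvNextDelim lines (i + 1)
    PySem.Str.join ""
        ((PySem.List.slice lines (some (i : Int)) (some (j : Int))).map (fun line => line ++ "\n"))
      :: pvAltLoop lines j
  else []
termination_by lines.length - i
decreasing_by
  have := pvNextDelim_ge lines (i + 1)
  omega

def parse__show_route_peer_py_alt (bird_dump : String) : List String :=
  let lines := PySem.Str.splitlines bird_dump
  pvAltLoop lines (pvNextDelim lines 0)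

-- ===== PRECONDITION & SPEC =====
def Spec_parse__show_route_peer_py (bird_dump : String) (out : List String) : Prop := out = parse__show_route_peer_py_alt bird_dump
instance (bird_dump : String) (out : List String) : Decidable (Spec_parse__show_route_peer_py bird_dump out) := by unfold Spec_parse__show_route_peer_py; infer_instance

-- ===== CLAIM (what is proved, stated in full; the proofs are below) =====
def Claim_equal_parse__show_route_peer_py : Prop := ∀ (bird_dump : String), Dom_parse__show_route_peer_py bird_dump → Spec_parse__show_route_peer_py bird_dump (parse__show_route_peer_py bird_dump)

-- ===== LEMMAS AND PROOFS =====

-- delimiter test, abbreviated for the proofs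
def pvD (l : String) : Bool := PySem.Str.isIn "unicast" l

-- reference decomposition both ports are reduced to:
-- skip non-delimiter lines, emit one joined block per delimiter line
def pvRef : List String → List String
  | [] => []
  | l :: t =>
    if pvD l then
      PySem.Str.join ""
          ((l :: t.takeWhile (fun x => !pvD x)).map (fun line => line ++ "\n"))
        :: pvRef (t.drop (t.takeWhile (fun x => !pvD x)).length)
    else pvRef t
termination_by ls => ls.length
decreasing_by
  · simp only [List.length_drop, List.length_cons]; omega
  · simp only [List.length_cons]; omega

-- string facts
theorem pv_join_nil (sep : String) : PySem.Str.join sep [] = "" := by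
  apply String.ext
  simp [PySem.Str.toList_join, PySem.Chars.join_nil]

theorem pv_join_empty_cons (x : String) (xs : List String) :
    PySem.Str.join "" (x :: xs) = x ++ PySem.Str.join "" xs := by
  apply String.ext
  cases xs with
  | nil =>
    simp [PySem.Str.toList_join, PySem.Chars.join_singleton, pv_join_nil]
  | cons y ys =>
    simp [PySem.Str.toList_join, PySem.Chars.join_cons_cons]

theorem pv_newline_ne_empty (l : String) : l ++ "\n" ≠ "" := by
  intro h
  have := congrArg String.toList h
  simp at this

theorem pv_append_newline_ne_empty (a l : String) : a ++ (l ++ "\n") ≠ "" := by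
  intro h
  have := congrArg String.toList h
  simp at this

-- the four shapes of one loop step of A
theorem pvStepA_delim_empty {l : String} (h : PySem.Str.isIn "unicast" l = true)
    (blocks : List String) : pvStepA (blocks, "") l = (blocks, l ++ "\n") := by
  unfold pvStepA
  rw [if_pos h]
  simp

theorem pvStepA_delim_pos {l : String} (h : PySem.Str.isIn "unicast" l = true)
    (blocks : List String) (dump : String) (hd : dump ≠ "") :
    pvStepA (blocks, dump) l = (blocks ++ [dump], l ++ "\n") := by
  unfold pvStepA
  rw [if_pos h, if_pos hd]
  simp

theorem pvStepA_nondelim_empty {l : String} (h : PySem.Str.isIn "unicast" l = false)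
    (blocks : List String) : pvStepA (blocks, "") l = (blocks, "") := by
  unfold pvStepA
  rw [if_neg (by simp only [h]; decide), if_neg (by simp)]

theorem pvStepA_nondelim_pos {l : String} (h : PySem.Str.isIn "unicast" l = false)
    (blocks : List String) (dump : String) (hd : dump ≠ "") :
    pvStepA (blocks, dump) l = (blocks, dump ++ (l ++ "\n")) := by
  unfold pvStepA
  rw [if_neg (by simp only [h]; decide), if_pos hd]

-- finishing step of A
def pvFinA (r : List String × String) : List String :=
  if r.2 ≠ "" then r.1 ++ [r.2] else r.1

-- joined continuation of the chunk currently in dump, and the lines after that chunk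
def pvCJ (ls : List String) : String :=
  PySem.Str.join "" ((ls.takeWhile (fun x => !pvD x)).map (fun line => line ++ "\n"))

def pvRest (ls : List String) : List String :=
  ls.drop (ls.takeWhile (fun x => !pvD x)).length

-- the loop invariant of A's fold, for empty and for nonempty dump
theorem pv_foldA_char (ls : List String) :
    (∀ blocks : List String,
        pvFinA (ls.foldl pvStepA (blocks, "")) = blocks ++ pvRef ls) ∧
    (∀ (blocks : List String) (dump : String), dump ≠ "" →
        pvFinA (ls.foldl pvStepA (blocks, dump))
          = blocks ++ (dump ++ pvCJ ls) :: pvRef (pvRest ls)) := by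
  induction ls with
  | nil =>
    constructor
    · intro blocks; simp [pvFinA, pvRef]
    · intro blocks dump hd
      simp [pvFinA, hd, pvCJ, pvRest, pvRef, pv_join_nil]
  | cons l t ih =>
    constructor
    · intro blocks
      simp only [List.foldl_cons]
      by_cases hdl : pvD l = true
      · rw [pvStepA_delim_empty hdl blocks,
          ih.2 blocks (l ++ "\n") (pv_newline_ne_empty l)]
        simp [pvRef, hdl, pvCJ, pvRest, pv_join_empty_cons]
      · have hdl' : PySem.Str.isIn "unicast" l = false := by
          simpa [pvD] using hdl
        rw [pvStepA_nondelim_empty hdl' blocks, ih.1 blocks, pvRef,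
          if_neg (by simp only [pvD, hdl']; decide)]
    · intro blocks dump hd
      simp only [List.foldl_cons]
      by_cases hdl : pvD l = true
      · rw [pvStepA_delim_pos hdl blocks dump hd,
          ih.2 (blocks ++ [dump]) (l ++ "\n") (pv_newline_ne_empty l)]
        simp [pvRef, hdl, pvCJ, pvRest, pv_join_empty_cons, pv_join_nil]
      · have hdl' : PySem.Str.isIn "unicast" l = false := by
          simpa [pvD] using hdl
        rw [pvStepA_nondelim_pos hdl' blocks dump hd,
          ih.2 blocks (dump ++ (l ++ "\n")) (pv_append_newline_ne_empty dump l)]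
        have hC : PySem.Chars.isIn ['u', 'n', 'i', 'c', 'a', 's', 't'] l.toList = false := by
          simpa using hdl'
        have htw : (l :: t).takeWhile (fun x => !pvD x)
            = l :: t.takeWhile (fun x => !pvD x) := by
          simp [List.takeWhile_cons, pvD, hC]
        simp only [pvCJ, pvRest, htw, List.map_cons, List.length_cons,
          List.drop_succ_cons, pv_join_empty_cons]
        simp [String.append_assoc]

-- pvNextDelim computed on a suffix: skip the non-delimiter prefix
theorem pv_nextDelim_eq (lines : List String) (k : Nat) (t : List String)
    (h : lines.drop k = t) :
    pvNextDelim lines k = k + (t.takeWhile (fun x => !pvD x)).length := by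
  induction t generalizing k with
  | nil =>
    have hk : lines.length ≤ k := List.drop_eq_nil_iff.mp h
    rw [pvNextDelim]
    simp [Nat.not_lt.mpr hk]
  | cons x xs ih =>
    have hk : k < lines.length := by
      by_contra hk
      rw [List.drop_eq_nil_of_le (Nat.not_lt.mp hk)] at h
      simp at h
    have hget : lines.getD k "" = x := by
      have hx : lines[k]? = some x := by
        have := List.getElem?_drop (xs := lines) (i := k) (j := 0)
        rw [h] at this
        simpa using this.symm
      simp [List.getD_eq_getElem?_getD, hx]
    rw [pvNextDelim, dif_pos hk, hget]
    by_cases hdx : PySem.Str.isIn "unicast" x = true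
    · rw [if_pos hdx]
      have hC : PySem.Chars.isIn ['u', 'n', 'i', 'c', 'a', 's', 't'] x.toList = true := by simpa using hdx
      simp [List.takeWhile_cons, pvD, hC]
    · have hdx' : PySem.Str.isIn "unicast" x = false := by
        simpa using hdx
      have hC : PySem.Chars.isIn ['u', 'n', 'i', 'c', 'a', 's', 't'] x.toList = false := by simpa using hdx'
      rw [if_neg hdx]
      have hdrop : lines.drop (k + 1) = xs := by
        rw [← List.tail_drop, h]
        simp
      rw [ih (k + 1) hdrop]
      have : (x :: xs).takeWhile (fun x => !pvD x)
          = x :: xs.takeWhile (fun x => !pvD x) := by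
        simp [List.takeWhile_cons, pvD, hC]
      rw [this]
      simp
      omega

-- pvNextDelim stops at the end or at a delimiter line
theorem pv_nextDelim_stop (lines : List String) (k : Nat) :
    lines.length ≤ pvNextDelim lines k ∨ pvD (lines.getD (pvNextDelim lines k) "") = true := by
  rw [pvNextDelim]
  split
  · split
    · next hd => right; exact hd
    · exact pv_nextDelim_stop lines (k + 1)
  · left; omega
termination_by lines.length - k

-- B's loop computes the reference decomposition of its suffix
theorem pv_altLoop_eq (lines : List String) (i : Nat)
    (hdel : lines.length ≤ i ∨ pvD (lines.getD i "") = true) :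
    pvAltLoop lines i = pvRef (lines.drop i) := by
  rcases Nat.lt_or_ge i lines.length with hi | hi
  · rcases hdel with hge | hdl
    · omega
    obtain ⟨l, t, hlt⟩ : ∃ l t, lines.drop i = l :: t := by
      cases hdt : lines.drop i with
      | nil =>
        rw [List.drop_eq_nil_iff] at hdt; omega
      | cons a b => exact ⟨a, b, rfl⟩
    have hget : lines.getD i "" = l := by
      have hx : lines[i]? = some l := by
        have := List.getElem?_drop (xs := lines) (i := i) (j := 0)
        rw [hlt] at this
        simpa using this.symm
      simp [List.getD_eq_getElem?_getD, hx]
    have hdl' : pvD l = true := by rw [← hget]; exact hdl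
    have hdropsucc : lines.drop (i + 1) = t := by
      rw [← List.tail_drop, hlt]
      simp
    have hj : pvNextDelim lines (i + 1)
        = (i + 1) + (t.takeWhile (fun x => !pvD x)).length :=
      pv_nextDelim_eq lines (i + 1) t hdropsucc
    have hslice : PySem.List.slice lines (some (i : Int))
        (some ((pvNextDelim lines (i + 1)) : Int))
        = l :: t.takeWhile (fun x => !pvD x) := by
      rw [hj]
      rw [PySem.List.slice_natCast lines i ((i + 1) + (t.takeWhile (fun x => !pvD x)).length)]
      rw [hlt]
      have harith : (i + 1) + (t.takeWhile (fun x => !pvD x)).length - i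
          = (t.takeWhile (fun x => !pvD x)).length + 1 := by omega
      rw [harith, List.take_succ_cons]
      congr 1
      exact (List.prefix_iff_eq_take.mp (List.takeWhile_prefix _)).symm
    have hrec : pvAltLoop lines (pvNextDelim lines (i + 1))
        = pvRef (lines.drop (pvNextDelim lines (i + 1))) :=
      pv_altLoop_eq lines (pvNextDelim lines (i + 1)) (pv_nextDelim_stop lines (i + 1))
    rw [pvAltLoop, dif_pos hi]
    simp only []
    rw [hslice, hrec, hj, hlt, pvRef, if_pos hdl']
    have hdd : lines.drop (i + 1 + (t.takeWhile (fun x => !pvD x)).length)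
        = t.drop (t.takeWhile (fun x => !pvD x)).length := by
      rw [← hdropsucc, List.drop_drop]
    rw [hdd]
  · rw [pvAltLoop, dif_neg (by omega), List.drop_eq_nil_of_le hi, pvRef]
termination_by lines.length - i
decreasing_by
  have := pvNextDelim_ge lines (i + 1)
  omega

-- pvRef ignores a non-delimiter prefix
theorem pvRef_rest (ls : List String) :
    pvRef (ls.drop (ls.takeWhile (fun x => !pvD x)).length) = pvRef ls := by
  induction ls with
  | nil => simp
  | cons l t ih =>
    by_cases hdl : pvD l = true
    · simp [List.takeWhile_cons, hdl]
    · have htw : (l :: t).takeWhile (fun x => !pvD x)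
          = l :: t.takeWhile (fun x => !pvD x) := by
        simp [List.takeWhile_cons, hdl]
      rw [htw, List.length_cons, List.drop_succ_cons, ih, pvRef, if_neg (by simp [hdl])]

-- ===== VERDICT (by name: the statement is the Claim_ definition above) =====
theorem parse__show_route_peer_py_spec : Claim_equal_parse__show_route_peer_py := by
  intro s _
  unfold Spec_parse__show_route_peer_py
  have hA : parse__show_route_peer_py s
      = pvFinA ((PySem.Str.splitlines s).foldl pvStepA ([], "")) := rfl
  have hB : parse__show_route_peer_py_alt s
      = pvAltLoop (PySem.Str.splitlines s) (pvNextDelim (PySem.Str.splitlines s) 0) := rfl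
  rw [hA, hB, (pv_foldA_char _).1 [],
    pv_altLoop_eq _ _ (pv_nextDelim_stop (PySem.Str.splitlines s) 0),
    pv_nextDelim_eq (PySem.Str.splitlines s) 0 (PySem.Str.splitlines s) (by simp)]
  simp only [Nat.zero_add, List.nil_append]
  exact (pvRef_rest (PySem.Str.splitlines s)).symm
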